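-- pv_equiv track=rewrite | github.com/dBug-Labs/nova_care | services/ai/prompts.py | get_assessment_prompt
-- ===== SOURCE A (Python) =====
-- ASSESSMENT_QUESTIONS = {
--     "general": [
--         "How have you been feeling overall this week on a scale of 1 to 10?",
--         "Have you been taking all your medicines on time?",
--         "How has your sleep been? How many hours per night roughly?",
--         "How much water are you drinking daily?",
--         "Have you been doing any physical activity this week?",
--         "Any new pain or discomfort you'd like to tell me about?",
--         "How has your appetite been? Any changes in your diet?",
--         "How are you managing stress levels?",
--     ],
--     "diabetes": [
--         "When did you last check your blood sugar? What was the reading?",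
--         "Have you had any episodes of feeling very shaky, sweaty, or dizzy? (low sugar signs)",
--         "Are your feet feeling normal — no numbness or tingling?",
--         "Have you been eating at regular meal times?",
--         "How much sweet food or refined carbs have you had this week?",
--     ],
--     "hypertension": [
--         "Have you checked your BP recently? What was the reading?",
--         "Have you had any headaches, especially in the morning?",
--         "How much salt are you consuming? Do you add extra salt to food?",
--         "Are you feeling stressed or anxious more than usual?",
--         "Have you been regular with your BP medicines?",
--     ],
--     "heart_disease": [
--         "Any chest discomfort, tightness, or pressure recently?",
--         "Do you get breathless when climbing stairs or walking?",
--         "Have you noticed any swelling in your feet or ankles?",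
--         "Have you been doing your prescribed cardiac exercises?",
--         "Any palpitations or irregular heartbeat sensations?",
--     ],
-- }
--
-- def get_assessment_prompt(conditions: list, responses_so_far: list) -> str:
--     """Generate next assessment question based on conditions and previous responses."""
--     asked = len(responses_so_far)
--     questions = ASSESSMENT_QUESTIONS["general"].copy()
--
--     for condition in conditions:
--         if condition in ASSESSMENT_QUESTIONS:
--             questions.extend(ASSESSMENT_QUESTIONS[condition])
--
--     if asked < len(questions):
--         return questions[asked]
--     return None  # Assessment complete
-- ===== SOURCE B (Python) =====
-- ASSESSMENT_QUESTIONS = {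
--     "general": [
--         "How have you been feeling overall this week on a scale of 1 to 10?",
--         "Have you been taking all your medicines on time?",
--         "How has your sleep been? How many hours per night roughly?",
--         "How much water are you drinking daily?",
--         "Have you been doing any physical activity this week?",
--         "Any new pain or discomfort you'd like to tell me about?",
--         "How has your appetite been? Any changes in your diet?",
--         "How are you managing stress levels?",
--     ],
--     "diabetes": [
--         "When did you last check your blood sugar? What was the reading?",
--         "Have you had any episodes of feeling very shaky, sweaty, or dizzy? (low sugar signs)",
--         "Are your feet feeling normal — no numbness or tingling?",
--         "Have you been eating at regular meal times?",
--         "How much sweet food or refined carbs have you had this week?",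
--     ],
--     "hypertension": [
--         "Have you checked your BP recently? What was the reading?",
--         "Have you had any headaches, especially in the morning?",
--         "How much salt are you consuming? Do you add extra salt to food?",
--         "Are you feeling stressed or anxious more than usual?",
--         "Have you been regular with your BP medicines?",
--     ],
--     "heart_disease": [
--         "Any chest discomfort, tightness, or pressure recently?",
--         "Do you get breathless when climbing stairs or walking?",
--         "Have you noticed any swelling in your feet or ankles?",
--         "Have you been doing your prescribed cardiac exercises?",
--         "Any palpitations or irregular heartbeat sensations?",
--     ],
-- }
--
-- def get_assessment_prompt(conditions: list, responses_so_far: list) -> str: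
--     """Generate next assessment question without building a flattened list:
--     walk the relevant blocks keeping a running offset."""
--     blocks = [ASSESSMENT_QUESTIONS["general"]]
--     for condition in conditions:
--         block = ASSESSMENT_QUESTIONS.get(condition)
--         if block is not None:
--             blocks.append(block)
--
--     remaining = len(responses_so_far)
--     for block in blocks:
--         if remaining < len(block):
--             return block[remaining]
--         remaining -= len(block)
--     return None  # Assessment complete
-- ===== Notes on version B (the rewrite author's own statement) =====
-- stated objective: alternative
-- what changed: B never concatenates the question lists: it collects the relevant blocks and scans them with a running offset, returning block[remaining] when the offset falls inside a block, instead of A's flatten-then-index.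
import Mathlib
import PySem

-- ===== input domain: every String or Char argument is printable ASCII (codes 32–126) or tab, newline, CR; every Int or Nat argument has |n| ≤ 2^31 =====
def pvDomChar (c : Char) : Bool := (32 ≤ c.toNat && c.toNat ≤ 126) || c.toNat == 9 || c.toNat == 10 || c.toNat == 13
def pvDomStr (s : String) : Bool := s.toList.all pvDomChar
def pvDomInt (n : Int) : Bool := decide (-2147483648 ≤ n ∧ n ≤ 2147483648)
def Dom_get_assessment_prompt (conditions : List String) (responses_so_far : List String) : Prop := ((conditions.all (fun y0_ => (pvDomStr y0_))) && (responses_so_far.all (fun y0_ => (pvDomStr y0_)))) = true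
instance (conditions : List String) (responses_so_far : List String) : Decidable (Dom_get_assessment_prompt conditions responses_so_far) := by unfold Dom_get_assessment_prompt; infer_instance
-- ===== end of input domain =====

-- B avoids building the flattened question list: it walks the relevant blocks with a
-- running offset instead of concatenating them and indexing once (objective: alternative).

-- ===== PORT A =====
-- the module-level ASSESSMENT_QUESTIONS dict, as an insertion-ordered association list
def generalQs : List String := [
  "How have you been feeling overall this week on a scale of 1 to 10?",
  "Have you been taking all your medicines on time?",
  "How has your sleep been? How many hours per night roughly?",
  "How much water are you drinking daily?",
  "Have you been doing any physical activity this week?",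
  "Any new pain or discomfort you'd like to tell me about?",
  "How has your appetite been? Any changes in your diet?",
  "How are you managing stress levels?"]
def diabetesQs : List String := [
  "When did you last check your blood sugar? What was the reading?",
  "Have you had any episodes of feeling very shaky, sweaty, or dizzy? (low sugar signs)",
  "Are your feet feeling normal — no numbness or tingling?",
  "Have you been eating at regular meal times?",
  "How much sweet food or refined carbs have you had this week?"]
def hypertensionQs : List String := [
  "Have you checked your BP recently? What was the reading?",
  "Have you had any headaches, especially in the morning?",
  "How much salt are you consuming? Do you add extra salt to food?",
  "Are you feeling stressed or anxious more than usual?",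
  "Have you been regular with your BP medicines?"]
def heartDiseaseQs : List String := [
  "Any chest discomfort, tightness, or pressure recently?",
  "Do you get breathless when climbing stairs or walking?",
  "Have you noticed any swelling in your feet or ankles?",
  "Have you been doing your prescribed cardiac exercises?",
  "Any palpitations or irregular heartbeat sensations?"]
def ASSESSMENT_QUESTIONS : PySem.Dict String (List String) := PySem.Dict.ofList
  [("general", generalQs), ("diabetes", diabetesQs),
   ("hypertension", hypertensionQs), ("heart_disease", heartDiseaseQs)]

def get_assessment_prompt (conditions : List String) (responses_so_far : List String) : Option String :=
  let asked := responses_so_far.length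
  let questions :=
    conditions.foldl (fun qs condition =>
      match PySem.Dict.get? ASSESSMENT_QUESTIONS condition with
      | some block => qs ++ block          -- 'condition in ASSESSMENT_QUESTIONS' then extend
      | none => qs) generalQs
  if asked < questions.length then questions[asked]? else none

-- ===== PORT B =====
def scanBlocks : List (List String) → Nat → Option String
  | [], _ => none
  | b :: bs, remaining =>
      if remaining < b.length then b[remaining]?
      else scanBlocks bs (remaining - b.length)

def get_assessment_prompt_alt (conditions : List String) (responses_so_far : List String) : Option String :=
  let blocks := generalQs ::
    conditions.filterMap (fun condition => PySem.Dict.get? ASSESSMENT_QUESTIONS condition)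
  scanBlocks blocks responses_so_far.length

-- ===== PRECONDITION & SPEC =====
def Spec_get_assessment_prompt (conditions : List String) (responses_so_far : List String) (out : Option String) : Prop := out = get_assessment_prompt_alt conditions responses_so_far
instance (conditions : List String) (responses_so_far : List String) (out : Option String) : Decidable (Spec_get_assessment_prompt conditions responses_so_far out) := by unfold Spec_get_assessment_prompt; infer_instance

-- ===== CLAIM (what is proved, stated in full; the proofs are below) =====
def Claim_equal_get_assessment_prompt : Prop := ∀ (conditions : List String) (responses_so_far : List String), Dom_get_assessment_prompt conditions responses_so_far → Spec_get_assessment_prompt conditions responses_so_far (get_assessment_prompt conditions responses_so_far)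

-- ===== LEMMAS AND PROOFS =====

-- scanning blocks with a running offset is indexing the flattened list
theorem scanBlocks_eq_flatten_getElem? (bs : List (List String)) (r : Nat) :
    scanBlocks bs r = bs.flatten[r]? := by
  induction bs generalizing r with
  | nil => simp [scanBlocks]
  | cons b bs ih =>
      simp only [scanBlocks, List.flatten_cons]
      split
      · rw [List.getElem?_append_left (by omega)]
      · rw [ih, List.getElem?_append_right (by omega)]

-- A's foldl builds exactly the flattening of the blocks B collects
theorem foldl_blocks (conditions : List String) (init : List String) :
    conditions.foldl (fun qs condition =>
      match PySem.Dict.get? ASSESSMENT_QUESTIONS condition with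
      | some block => qs ++ block
      | none => qs) init
    = init ++ (conditions.filterMap (fun condition => PySem.Dict.get? ASSESSMENT_QUESTIONS condition)).flatten := by
  induction conditions generalizing init with
  | nil => simp
  | cons c cs ih =>
      simp only [List.foldl_cons, List.filterMap_cons]
      cases PySem.Dict.get? ASSESSMENT_QUESTIONS c <;> simp [ih]

-- ===== VERDICT (by name: the statement is the Claim_ definition above) =====
theorem get_assessment_prompt_spec : Claim_equal_get_assessment_prompt := by
  intro conditions responses_so_far _
  unfold Spec_get_assessment_prompt get_assessment_prompt get_assessment_prompt_alt
  rw [scanBlocks_eq_flatten_getElem?, foldl_blocks]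
  simp only [List.flatten_cons]
  split
  · rfl
  · rw [eq_comm, List.getElem?_eq_none_iff]
    omega
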